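-- pv_equiv track=rewrite | github.com/gavinsh32/GenomeAlignment | cannon.py | calcGene
-- ===== SOURCE A (Python) =====
-- def calcGene(gene):
--     score = 0
--     for allele in gene:
--         match allele:
--             case 'A':
--                 score += 5
--             case 'C':
--                 score += 1
--             case 'T':
--                 score += -1
--             case 'G':
--                 score += -5
--             case _:
--                 pass
--     return score
-- ===== SOURCE B (Python) =====
-- SCORE = {'A': 5, 'C': 1, 'T': -1, 'G': -5}
--
-- def calcGene(gene):
--     n = len(gene)
--     if n == 0:
--         return 0
--     if n == 1:
--         return SCORE.get(gene, 0)
--     m = n // 2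
--     return calcGene(gene[:m]) + calcGene(gene[m:])
-- ===== Notes on version B (the rewrite author's own statement) =====
-- stated objective: alternative
-- what changed: Replaces A's linear accumulator loop with a divide-and-conquer recursion: the gene is split in half, each half scored recursively, and a single-character base case reads a score table; correctness follows because the per-character score sum is associative.
import Mathlib
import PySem

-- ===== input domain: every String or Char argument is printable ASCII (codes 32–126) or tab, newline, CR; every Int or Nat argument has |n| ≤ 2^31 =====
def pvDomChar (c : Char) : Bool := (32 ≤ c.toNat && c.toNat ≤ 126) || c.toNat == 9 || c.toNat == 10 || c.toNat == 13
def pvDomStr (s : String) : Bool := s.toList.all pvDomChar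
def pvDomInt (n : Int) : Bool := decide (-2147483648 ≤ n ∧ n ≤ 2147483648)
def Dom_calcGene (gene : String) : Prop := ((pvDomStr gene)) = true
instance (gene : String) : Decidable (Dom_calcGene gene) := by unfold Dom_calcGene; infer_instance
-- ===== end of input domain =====

-- B replaces A's linear accumulator loop with a divide-and-conquer recursion (split in half,
-- score table at single characters); objective: alternative decomposition, same cost.

-- ===== PORT A =====
-- A: loop over the characters, branching on each, accumulating a score.
def calcGeneStep (score : Int) (allele : Char) : Int :=
  if allele = 'A' then score + 5
  else if allele = 'C' then score + 1
  else if allele = 'T' then score + (-1)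
  else if allele = 'G' then score + (-5)
  else score

def calcGene (gene : String) : Int :=
  gene.toList.foldl calcGeneStep 0

-- ===== PORT B =====
-- B: SCORE = {'A':5,'C':1,'T':-1,'G':-5}; split the string in half and recurse,
-- SCORE.get(gene, 0) on a single character. gene[:m]/gene[m:] with 0 ≤ m ≤ n are take/drop.
def scoreTable : PySem.Dict String Int :=
  PySem.Dict.ofList [("A", 5), ("C", 1), ("T", -1), ("G", -5)]

def calcGeneAux (l : List Char) : Int :=
  if l.length = 0 then 0
  else if l.length = 1 then scoreTable.getD (String.ofList l) 0
  else calcGeneAux (l.take (l.length / 2)) + calcGeneAux (l.drop (l.length / 2))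
termination_by l.length
decreasing_by
  · simp only [List.length_take]; omega
  · simp only [List.length_drop]; omega

def calcGene_alt (gene : String) : Int :=
  calcGeneAux gene.toList

-- ===== PRECONDITION & SPEC =====
def Spec_calcGene (gene : String) (out : Int) : Prop := out = calcGene_alt gene
instance (gene : String) (out : Int) : Decidable (Spec_calcGene gene out) := by unfold Spec_calcGene; infer_instance

-- ===== CLAIM =====
def Claim_equal_calcGene : Prop := ∀ (gene : String), Dom_calcGene gene → Spec_calcGene gene (calcGene gene)

-- ===== LEMMAS AND PROOFS =====
-- per-character score, the common denominator of both proofs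
def geneVal (c : Char) : Int :=
  if c = 'A' then 5 else if c = 'C' then 1 else if c = 'T' then -1 else if c = 'G' then -5 else 0

theorem foldl_eq_sum (l : List Char) (s : Int) :
    l.foldl calcGeneStep s = s + (l.map geneVal).sum := by
  induction l generalizing s with
  | nil => simp
  | cons c t ih =>
    simp only [List.foldl_cons, ih, List.map_cons, List.sum_cons]
    unfold calcGeneStep geneVal
    split_ifs <;> ring

theorem getD_single (c : Char) : scoreTable.getD (String.ofList [c]) 0 = geneVal c := by
  unfold geneVal
  by_cases h1 : c = 'A' <;> by_cases h2 : c = 'C' <;> by_cases h3 : c = 'T' <;>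
      by_cases h4 : c = 'G' <;> simp only [h1, h2, h3, h4, if_true, if_false] <;>
    first
    | (subst_vars; decide)
    | · have e1 : (("A" : String) == String.ofList [c]) = false := by
          simp [String.ext_iff, show ("A" : String).toList = ['A'] from rfl, Ne.symm h1]
        have e2 : (("C" : String) == String.ofList [c]) = false := by
          simp [String.ext_iff, show ("C" : String).toList = ['C'] from rfl, Ne.symm h2]
        have e3 : (("T" : String) == String.ofList [c]) = false := by
          simp [String.ext_iff, show ("T" : String).toList = ['T'] from rfl, Ne.symm h3]
        have e4 : (("G" : String) == String.ofList [c]) = false := by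
          simp [String.ext_iff, show ("G" : String).toList = ['G'] from rfl, Ne.symm h4]
        simp [scoreTable, PySem.Dict.ofList, PySem.Dict.update, PySem.Dict.insert,
          PySem.Dict.empty, PySem.Dict.getD, PySem.Dict.get?, PySem.Dict.contains,
          e1, e2, e3, e4]

theorem aux_eq_sum (l : List Char) : calcGeneAux l = (l.map geneVal).sum := by
  fun_induction calcGeneAux l with
  | case1 l h0 => simp [List.length_eq_zero_iff.mp h0]
  | case2 l h0 h1 =>
    obtain ⟨c, rfl⟩ := List.length_eq_one_iff.mp h1
    simp [getD_single]
  | case3 l h0 h1 ih1 ih2 =>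
    rw [ih1, ih2, ← List.sum_append, ← List.map_append, List.take_append_drop]

-- ===== VERDICT =====
theorem calcGene_spec : Claim_equal_calcGene := by
  intro gene _
  unfold Spec_calcGene calcGene calcGene_alt
  rw [foldl_eq_sum, aux_eq_sum]
  ring
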